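-- pv_equiv track=rewrite | github.com/qkrtiger/Programmers | 프로그래머스/Lv.0/181855. 문자열 묶기/문자열 묶기.py | solution
-- ===== SOURCE A (Python) =====
-- def solution(strArr):
--     length_dict = {}
--
--     for str in strArr:
--         if len(str) in length_dict:
--             length_dict[len(str)] += 1
--         else:
--             length_dict[len(str)] = 1
--
--     return max(length_dict.values())
-- ===== SOURCE B (Python) =====
-- def solution(strArr):
--     lengths = sorted(len(s) for s in strArr)
--     best = 0
--     run = 0
--     prev = None
--     for L in lengths:
--         run = run + 1 if L == prev else 1
--         prev = L
--         best = max(best, run)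
--     return best
-- ===== Notes on version B (the rewrite author's own statement) =====
-- stated objective: alternative
-- what changed: Replaces the length->count dict and max over its values by sorting the lengths and scanning for the longest run of equal adjacent values.
-- crash fix: On empty strArr A raises ValueError (max of an empty sequence); B's scan naturally returns 0 there. — e.g. on solution([]): A raises ValueError, B returns 0
import Mathlib
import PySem

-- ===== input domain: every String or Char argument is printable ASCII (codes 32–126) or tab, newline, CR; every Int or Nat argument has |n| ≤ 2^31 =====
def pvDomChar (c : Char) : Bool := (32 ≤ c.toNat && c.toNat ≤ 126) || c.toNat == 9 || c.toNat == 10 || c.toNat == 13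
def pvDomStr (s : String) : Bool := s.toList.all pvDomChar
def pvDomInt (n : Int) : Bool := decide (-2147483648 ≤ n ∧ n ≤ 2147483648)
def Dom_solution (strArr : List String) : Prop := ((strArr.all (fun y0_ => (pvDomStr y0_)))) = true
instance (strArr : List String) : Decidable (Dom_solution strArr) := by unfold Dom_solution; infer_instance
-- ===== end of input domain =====

-- B replaces A's length→count dict + max over its values by sorting the lengths and
-- scanning for the longest run of equal adjacent values (objective: alternative algorithm).

-- ===== PORT A =====
def solution (strArr : List String) : Int :=
  let length_dict : PySem.Dict Int Int :=
    strArr.foldl (fun d s =>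
      if d.contains (PySem.Str.len s) then
        d.insert (PySem.Str.len s) (d.getD (PySem.Str.len s) 0 + 1)
      else
        d.insert (PySem.Str.len s) 1) PySem.Dict.empty
  match PySem.List.max? length_dict.values (fun v => v) with
  | some m => m
  | none => 0   -- unreachable under Pre_: Python's max raises ValueError on the empty dict

-- ===== PORT B =====
-- B-side helper: one step of B's run-scanning loop; state = (best, run, prev)
def pvStep (s : Int × Int × Option Int) (L : Int) : Int × Int × Option Int :=
  let run : Int := if some L = s.2.2 then s.2.1 + 1 else 1
  (max s.1 run, run, some L)

def solution_alt (strArr : List String) : Int :=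
  let lengths := PySem.List.sorted (strArr.map (fun s => PySem.Str.len s)) (fun x => x) false
  (lengths.foldl pvStep (0, 0, none)).1

-- ===== PRECONDITION & SPEC =====
-- Pre_ excludes only the empty list, on which Python A raises ValueError (max of empty sequence).
def Pre_solution (strArr : List String) : Prop := strArr ≠ []
instance (strArr : List String) : Decidable (Pre_solution strArr) := by unfold Pre_solution; infer_instance
def pvWitness_solution : List String := ["a", "bb", "cc"]

-- On empty strArr A raises ValueError (max of an empty sequence); B's scan naturally returns 0 there.
def Raises_solution (strArr : List String) : Prop := strArr = []
instance (strArr : List String) : Decidable (Raises_solution strArr) := by unfold Raises_solution; infer_instance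
def pvRaiseWitness_solution : List String := []
def pvRaiseWitnessOut_solution : Int := 0

def Spec_solution (strArr : List String) (out : Int) : Prop := out = solution_alt strArr
instance (strArr : List String) (out : Int) : Decidable (Spec_solution strArr out) := by unfold Spec_solution; infer_instance

-- ===== CLAIM (what is proved, stated in full; the proofs are below) =====
def Claim_equal_solution : Prop := ∀ (strArr : List String), Dom_solution strArr → Pre_solution strArr → Spec_solution strArr (solution strArr)
def Claim_raises_solution : Prop := (∀ (strArr : List String), Dom_solution strArr → Raises_solution strArr → ¬ Pre_solution strArr) ∧ (Dom_solution (pvRaiseWitness_solution) ∧ Raises_solution (pvRaiseWitness_solution) ∧ solution_alt (pvRaiseWitness_solution) = pvRaiseWitnessOut_solution)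

-- ===== LEMMAS AND PROOFS =====

-- the value both programs compute: the maximum multiplicity of an element of ys
def pvMaxCount (ys : List Int) : Int := (ys.map (fun y => (ys.count y : Int))).foldr max 0

lemma foldr_max_nonneg (l : List Int) : 0 ≤ l.foldr max 0 := by
  induction l with
  | nil => simp
  | cons a t ih => exact le_trans ih (le_max_right a _)

lemma le_foldr_max_of_mem {l : List Int} {y : Int} (h : y ∈ l) : y ≤ l.foldr max 0 := by
  induction l with
  | nil => simp at h
  | cons a t ih =>
    rcases List.mem_cons.mp h with rfl | h
    · exact le_max_left _ _
    · exact le_trans (ih h) (le_max_right _ _)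

lemma foldr_max_mem {l : List Int} (hne : l ≠ []) (hpos : ∀ x ∈ l, 0 < x) :
    l.foldr max 0 ∈ l := by
  induction l with
  | nil => exact absurd rfl hne
  | cons a t ih =>
    by_cases ht : t = []
    · subst ht
      simp only [List.foldr]
      have : 0 < a := hpos a (by simp)
      simp [max_eq_left (le_of_lt this)]
    · have := ih ht (fun x hx => hpos x (List.mem_cons_of_mem _ hx))
      simp only [List.foldr]
      rcases max_choice a (t.foldr max 0) with h | h
      · rw [h]; exact List.mem_cons_self
      · rw [h]; exact List.mem_cons_of_mem _ this

lemma foldr_max_eq_of_mem_iff {l₁ l₂ : List Int} (h : ∀ x, x ∈ l₁ ↔ x ∈ l₂)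
    (hne : l₁ ≠ []) (hpos : ∀ x ∈ l₁, 0 < x) :
    l₁.foldr max 0 = l₂.foldr max 0 := by
  have hne₂ : l₂ ≠ [] := by
    cases l₂ with
    | nil => cases l₁ with
      | nil => exact absurd rfl hne
      | cons a t => exact absurd ((h a).mp (by simp)) (by simp)
    | cons b t => simp
  have hpos₂ : ∀ x ∈ l₂, 0 < x := fun x hx => hpos x ((h x).mpr hx)
  apply le_antisymm
  · exact le_foldr_max_of_mem ((h _).mp (foldr_max_mem hne hpos))
  · exact le_foldr_max_of_mem ((h _).mpr (foldr_max_mem hne₂ hpos₂))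

lemma foldl_max_eq_foldr (t : List Int) : ∀ v : Int, 0 ≤ v →
    t.foldl max v = max v (t.foldr max 0) := by
  induction t with
  | nil => intro v hv; simp [max_eq_left hv]
  | cons a t ih =>
    intro v hv
    have h := ih (max v a) (le_trans hv (le_max_left _ _))
    simp only [List.foldl, List.foldr] at *
    rw [h, max_assoc]

lemma foldr_max_replicate (n : Nat) (c b : Int) (hn : 1 ≤ n) :
    (List.replicate n c).foldr max b = max c b := by
  induction n with
  | zero => omega
  | succ m ih =>
    by_cases hm : 1 ≤ m
    · simp only [List.replicate, List.foldr]
      rw [ih hm, ← max_assoc, max_self]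
    · have : m = 0 := by omega
      subst this; simp

-- B's loop over a constant block, continuing a run of a
lemma foldl_step_replicate (n : Nat) (a : Int) : ∀ best run : Int, run ≤ best →
    (List.replicate n a).foldl pvStep (best, run, some a) =
      (max best (run + n), run + n, some a) := by
  induction n with
  | zero => intro best run h; simp [max_eq_left h]
  | succ m ih =>
    intro best run h
    rw [List.replicate_succ, List.foldl_cons]
    have hstep : pvStep (best, run, some a) a = (max best (run + 1), run + 1, some a) := by
      simp [pvStep]
    rw [hstep, ih _ _ (le_max_right _ _)]
    have h1 : max (max best (run + 1)) (run + 1 + m) = max best (run + (m + 1)) := by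
      rw [max_assoc]
      congr 1
      · rw [max_eq_right (by omega)]
        ring
    rw [h1]
    congr 2
    push_cast; ring

-- B's loop over a constant block, starting a fresh run
lemma foldl_step_replicate_fresh (n : Nat) (a best run : Int) (prev : Option Int)
    (hprev : prev ≠ some a) (hn : 1 ≤ n) :
    (List.replicate n a).foldl pvStep (best, run, prev) = (max best (n : Int), (n : Int), some a) := by
  obtain ⟨m, rfl⟩ : ∃ m, n = m + 1 := ⟨n - 1, by omega⟩
  rw [List.replicate_succ, List.foldl_cons]
  have hstep : pvStep (best, run, prev) a = (max best 1, 1, some a) := by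
    simp [pvStep, if_neg (fun h : some a = prev => hprev h.symm)]
  rw [hstep, foldl_step_replicate m a _ _ (le_max_right _ _)]
  have h1 : max (max best 1) (1 + m) = max best (m + 1) := by
    rw [max_assoc]
    congr 1
    · rw [max_eq_right (by omega)]
      ring
  rw [h1]
  congr 2
  push_cast; ring

lemma dropWhile_head_false {p : Int → Bool} : ∀ (l : List Int) (b : Int) (rs : List Int),
    l.dropWhile p = b :: rs → p b = false := by
  intro l
  induction l with
  | nil => intro b rs h; simp [List.dropWhile] at h
  | cons a t ih =>
    intro b rs h
    rw [List.dropWhile_cons] at h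
    split at h
    · exact ih b rs h
    · cases h; simpa using ‹¬ p a = true›

-- main invariant of B's scan over a sorted list
lemma scan_sorted : ∀ (N : Nat) (ys : List Int), ys.length ≤ N → ys.Pairwise (· ≤ ·) →
    ∀ (best run : Int) (prev : Option Int), 0 ≤ best → (∀ y ∈ ys, prev ≠ some y) →
    (ys.foldl pvStep (best, run, prev)).1 = max best (pvMaxCount ys) := by
  intro N
  induction N with
  | zero =>
    intro ys hlen _ best run prev hb _
    have : ys = [] := List.eq_nil_of_length_eq_zero (by omega)
    subst this
    simp [pvMaxCount, max_eq_left hb]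
  | succ N ih =>
    intro ys hlen hsort best run prev hb hfresh
    cases ys with
    | nil => simp [pvMaxCount, max_eq_left hb]
    | cons a t =>
      set tw := t.takeWhile (fun y => y == a) with htw
      set rest := t.dropWhile (fun y => y == a) with hrest
      have hsplit : t = tw ++ rest := (List.takeWhile_append_dropWhile).symm
      have htw_rep : tw = List.replicate tw.length a := by
        apply List.eq_replicate_of_mem
        intro b hbmem
        have := List.mem_takeWhile_imp hbmem
        simpa using this
      set n := tw.length + 1 with hn
      have hys : a :: t = List.replicate n a ++ rest := by
        rw [hn, List.replicate_succ, List.cons_append, hsplit]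
        rw [htw_rep]
        simp
      -- ordering facts
      have hpair_t : t.Pairwise (· ≤ ·) := (List.pairwise_cons.mp hsort).2
      have ha_le : ∀ y ∈ t, a ≤ y := (List.pairwise_cons.mp hsort).1
      have hrest_pair : rest.Pairwise (· ≤ ·) := by
        have hsub : rest.Sublist t := by rw [hrest]; exact List.dropWhile_sublist _
        exact List.Pairwise.sublist hsub hpair_t
      have ha_notin : a ∉ rest := by
        intro hmem
        cases hre : rest with
        | nil => rw [hre] at hmem; simp at hmem
        | cons b rs =>
          have hbne : (b == a) = false := dropWhile_head_false t b rs (by rw [← hrest, hre])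
          have hbne' : b ≠ a := by simpa using hbne
          have hab : a ≤ b := ha_le b (by rw [hsplit, hre]; simp)
          have hba : b < a := by
            rw [hre] at hmem
            rcases List.mem_cons.mp hmem with rfl | hmem'
            · exact absurd rfl hbne'
            · have : b ≤ a := (List.pairwise_cons.mp (hre ▸ hrest_pair)).1 a hmem'
              exact lt_of_le_of_ne this hbne'
          exact absurd hab (not_le.mpr hba)
      -- counts
      have hcount_a : (a :: t).count a = n := by
        rw [hys, List.count_append, List.count_replicate_self,
          List.count_eq_zero.mpr ha_notin]
      have hcount_rest : ∀ y ∈ rest, (a :: t).count y = rest.count y := by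
        intro y hy
        have hya : y ≠ a := fun h => ha_notin (h ▸ hy)
        rw [hys, List.count_append, List.count_replicate, if_neg (by simpa using hya.symm)]
        ring
      -- pvMaxCount decomposition
      have hmc : pvMaxCount (a :: t) = max (n : Int) (pvMaxCount rest) := by
        unfold pvMaxCount
        conv_lhs => rw [hys]
        rw [List.map_append, List.map_replicate, List.foldr_append]
        have hmr : rest.map (fun y => ((List.replicate n a ++ rest).count y : Int)) =
            rest.map (fun y => (rest.count y : Int)) := by
          apply List.map_congr_left
          intro y hy
          have := hcount_rest y hy
          rw [hys] at this
          rw [this]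
        rw [hmr]
        have : ((a :: t).count a : Int) = (n : Int) := by exact_mod_cast congrArg Nat.cast hcount_a
        rw [hys] at this
        rw [this]
        exact foldr_max_replicate n _ _ (by omega)
      -- fold decomposition
      conv_lhs => rw [hys]
      rw [List.foldl_append]
      have hfresh_a : prev ≠ some a := hfresh a (by simp)
      rw [foldl_step_replicate_fresh n a best run prev hfresh_a (by omega)]
      have hlen' : rest.length ≤ N := by
        have hlen2 : (a :: t).length = n + rest.length := by rw [hys]; simp
        simp only [List.length_cons] at hlen hlen2
        omega
      rw [ih rest hlen' hrest_pair (max best n) (n : Int) (some a)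
        (le_trans hb (le_max_left _ _))
        (fun y hy h => ha_notin (by cases h; exact hy))]
      rw [hmc, max_assoc]

-- A's dict loop is the Counter of the lengths
lemma dict_eq_counter (strArr : List String) :
    strArr.foldl (fun d s =>
      if d.contains (PySem.Str.len s) then
        d.insert (PySem.Str.len s) (d.getD (PySem.Str.len s) 0 + 1)
      else
        d.insert (PySem.Str.len s) 1) PySem.Dict.empty
    = PySem.Dict.counter (strArr.map (fun s => PySem.Str.len s)) := by
  rw [← PySem.Dict.foldl_insert_getD_add_one_eq_counter, List.foldl_map]
  congr 1
  funext d s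
  by_cases h : d.contains (PySem.Str.len s) = true
  · rw [if_pos h]
  · have h' : d.contains (PySem.Str.len s) = false := by
      cases hb : d.contains (PySem.Str.len s)
      · rfl
      · exact absurd hb h
    rw [if_neg h, PySem.Dict.getD_of_not_contains d 0 h']
    norm_num

lemma mem_vals_iff (lengths : List Int) (x : Int) :
    x ∈ (PySem.Set.ofList lengths).map (fun k => ((lengths.count k : Nat) : Int)) ↔
    ∃ k ∈ lengths, x = ((lengths.count k : Nat) : Int) := by
  simp only [List.mem_map, PySem.Set.mem_ofList]
  constructor
  · rintro ⟨k, hk, rfl⟩; exact ⟨k, hk, rfl⟩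
  · rintro ⟨k, hk, rfl⟩; exact ⟨k, hk, rfl⟩

-- ===== VERDICT (by name: the statement is the Claim_ definition above) =====
theorem solution_spec : Claim_equal_solution := by
  intro strArr _ hpre
  unfold Spec_solution
  set lengths := strArr.map (fun s => PySem.Str.len s) with hlengths
  have hlne : lengths ≠ [] := by
    intro h
    exact hpre (List.map_eq_nil_iff.mp h)
  set sortedL := PySem.List.sorted lengths (fun x => x) false with hsortedL
  -- B's side: the scan computes pvMaxCount sortedL
  have hsne : sortedL ≠ [] := by
    intro h
    exact hlne ((PySem.List.sorted_eq_nil_iff lengths (fun x => x) false).mp h)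
  have hpair : sortedL.Pairwise (· ≤ ·) := by
    have := PySem.List.sorted_pairwise lengths (fun x => x)
    simpa using this
  have hB : solution_alt strArr = max 0 (pvMaxCount sortedL) := by
    unfold solution_alt
    rw [← hlengths, ← hsortedL]
    exact scan_sorted sortedL.length sortedL le_rfl hpair 0 0 none le_rfl
      (fun y _ h => by cases h)
  have hmcnn : 0 ≤ pvMaxCount sortedL := foldr_max_nonneg _
  rw [hB, max_eq_right hmcnn]
  -- A's side
  set vals := (PySem.Set.ofList lengths).map (fun k => ((lengths.count k : Nat) : Int)) with hvals
  have hdv : (PySem.Dict.counter lengths).values = vals := by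
    show (PySem.Dict.counter lengths).items.map (fun p => p.2) = vals
    rw [PySem.Dict.items_counter, List.map_map]
    rfl
  have hA : solution strArr =
      match PySem.List.max? vals (fun v => v) with
      | some m => m
      | none => 0 := by
    simp only [solution]
    rw [dict_eq_counter strArr, ← hlengths, hdv]
  have hvpos : ∀ x ∈ vals, 0 < x := by
    intro x hx
    rw [hvals] at hx
    rcases List.mem_map.mp hx with ⟨k, hk, rfl⟩
    have hk' : k ∈ lengths := (PySem.Set.mem_ofList lengths k).mp hk
    have : 1 ≤ lengths.count k := List.count_pos_iff.mpr hk'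
    exact_mod_cast this
  have hvne : vals ≠ [] := by
    cases hl : lengths with
    | nil => exact absurd hl hlne
    | cons a t =>
      intro hv
      have ha : a ∈ PySem.Set.ofList lengths := by
        rw [PySem.Set.mem_ofList]; rw [hl]; simp
      rw [hvals] at hv
      rcases List.map_eq_nil_iff.mp hv with h
      rw [h] at ha
      simp at ha
  -- evaluate max over vals
  obtain ⟨v, tv, hvt⟩ : ∃ v tv, vals = v :: tv := by
    cases hv : vals with
    | nil => exact absurd hv hvne
    | cons v tv => exact ⟨v, tv, rfl⟩
  have hA2 : solution strArr = vals.foldr max 0 := by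
    rw [hA, hvt, PySem.List.max?_id_cons]
    have hv0 : (0:Int) ≤ v := le_of_lt (hvpos v (by rw [hvt]; simp))
    show tv.foldl max v = (v :: tv).foldr max 0
    rw [foldl_max_eq_foldr tv v hv0]
    simp [List.foldr]
  rw [hA2]
  -- same member sets
  unfold pvMaxCount
  apply foldr_max_eq_of_mem_iff _ hvne hvpos
  intro x
  rw [hvals, mem_vals_iff]
  simp only [List.mem_map]
  constructor
  · rintro ⟨k, hk, rfl⟩
    refine ⟨k, ?_, ?_⟩
    · exact (PySem.List.mem_sorted lengths (fun x => x) false k).mpr hk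
    · rw [(PySem.List.sorted_perm lengths (fun x => x) false).count_eq]
  · rintro ⟨y, hy, rfl⟩
    refine ⟨y, ?_, ?_⟩
    · exact (PySem.List.mem_sorted lengths (fun x => x) false y).mp hy
    · rw [(PySem.List.sorted_perm lengths (fun x => x) false).count_eq]

def solution_raises : Claim_raises_solution := by
  unfold Claim_raises_solution
  exact ⟨fun s _ hr hp => hp hr, by decide⟩
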